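-- pv_equiv track=rewrite | github.com/tmammadov17503/Python_Projects | Python/DSA (Data Structures and Algorithms)/Week_3/(K)_bad_substring.py | func
-- ===== SOURCE A (Python) =====
-- def func(n, memo={}):
--     if n in memo:
--         return memo[n]
--     if n == 0:
--         return 1
--     if n == 1:
--         return 3
--     memo[n] = 3 * func(n - 1, memo) - func(n-2, memo)
--     return memo[n]
-- ===== SOURCE B (Python) =====
-- def func(n, memo={}):
--     # Fast doubling on Fibonacci: f(n) = F(2n+2), since f satisfies the
--     # recurrence f(k) = 3f(k-1) - f(k-2) with the even-index Fibonacci seeds.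
--     def fd(k):
--         # returns (F(k), F(k+1))
--         if k == 0:
--             return (0, 1)
--         a, b = fd(k // 2)
--         c = a * (2 * b - a)
--         d = a * a + b * b
--         if k % 2 == 0:
--             return (c, d)
--         return (d, c + d)
--     return fd(2 * n + 2)[0]
-- ===== Notes on version B (the rewrite author's own statement) =====
-- stated objective: faster
-- what changed: Replaces the linear memoized recursion with fast doubling on Fibonacci numbers, using f(n) = F(2n+2).
import Mathlib
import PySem

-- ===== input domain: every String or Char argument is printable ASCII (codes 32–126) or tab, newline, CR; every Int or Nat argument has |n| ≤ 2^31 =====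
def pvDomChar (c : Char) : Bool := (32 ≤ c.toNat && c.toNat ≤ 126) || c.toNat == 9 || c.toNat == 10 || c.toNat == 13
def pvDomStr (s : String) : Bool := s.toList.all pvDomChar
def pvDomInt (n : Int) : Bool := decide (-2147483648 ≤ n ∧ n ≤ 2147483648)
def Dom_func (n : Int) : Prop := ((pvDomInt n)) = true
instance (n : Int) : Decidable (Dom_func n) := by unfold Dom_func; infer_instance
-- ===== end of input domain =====

-- B replaces A's linear memoized recursion by fast doubling on Fibonacci (f(n) = F(2n+2)): O(log n) big-int ops.
-- A's memo argument only caches values; it never changes the returned value, so the ports take n alone.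

-- ===== PORT A =====
-- A's memoized recursion (base cases for n = 0 and n = 1, else 3 f(n-1) - f(n-2)): thanks to the memo,
-- each value is computed once, so the computation is the linear pair recursion below
-- carrying (f k, f (k+1)); func returns the first component at n.toNat.
def funcAux : Nat → Int × Int
  | 0 => (1, 3)
  | n + 1 =>
    let p := funcAux n
    (p.2, 3 * p.2 - p.1)

def func (n : Int) : Int := (funcAux n.toNat).1

-- ===== PORT B =====
-- fd k returns (F(k), F(k+1)) by fast doubling, exactly as Source B's fd.
def fd : Nat → Int × Int
  | 0 => (0, 1)
  | k + 1 =>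
    let p := fd ((k + 1) / 2)
    let a := p.1
    let b := p.2
    let c := a * (2 * b - a)
    let d := a * a + b * b
    if (k + 1) % 2 == 0 then (c, d) else (d, c + d)
decreasing_by exact Nat.div_lt_self (Nat.succ_pos k) (by norm_num)

def func_alt (n : Int) : Int := (fd (2 * n + 2).toNat).1

-- ===== PRECONDITION & SPEC =====
-- Pre: A recurses forever (RecursionError) for n < 0, so only n ≥ 0 is admitted.
def Pre_func (n : Int) : Prop := 0 ≤ n
instance (n : Int) : Decidable (Pre_func n) := by unfold Pre_func; infer_instance
def pvWitness_func : Int := (5)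

def Spec_func (n : Int) (out : Int) : Prop := out = func_alt n
instance (n : Int) (out : Int) : Decidable (Spec_func n out) := by unfold Spec_func; infer_instance

-- ===== CLAIM (what is proved, stated in full; the proofs are below) =====
def Claim_equal_func : Prop := ∀ (n : Int), Dom_func n → Pre_func n → Spec_func n (func n)

-- ===== LEMMAS AND PROOFS =====

lemma fd_eq : ∀ k : Nat, fd k = ((Nat.fib k : Int), (Nat.fib (k + 1) : Int)) := by
  intro k
  induction k using Nat.strong_induction_on with
  | _ k ih =>
    match k with
    | 0 => simp [fd]
    | j + 1 =>
      have hlt : (j + 1) / 2 < j + 1 := Nat.div_lt_self (Nat.succ_pos j) (by norm_num)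
      have hrec := ih ((j + 1) / 2) hlt
      set m := (j + 1) / 2 with hm
      have hle : Nat.fib m ≤ 2 * Nat.fib (m + 1) :=
        le_trans (Nat.fib_le_fib_succ) (by omega)
      have hcast : ((Nat.fib m * (2 * Nat.fib (m + 1) - Nat.fib m) : Nat) : Int)
          = (Nat.fib m : Int) * (2 * (Nat.fib (m + 1) : Int) - (Nat.fib m : Int)) := by
        push_cast [Nat.cast_sub hle]; ring
      rcases Nat.even_or_odd (j + 1) with he | ho
      · obtain ⟨t, ht⟩ := he
        have hmt : m = t := by omega
        have h2 : j + 1 = 2 * m := by omega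
        have hmod : (j + 1) % 2 = 0 := by omega
        have hfib2 : Nat.fib (2 * m) = Nat.fib m * (2 * Nat.fib (m + 1) - Nat.fib m) :=
          Nat.fib_two_mul m
        have hfib21 : Nat.fib (2 * m + 1) = Nat.fib (m + 1) ^ 2 + Nat.fib m ^ 2 :=
          Nat.fib_two_mul_add_one m
        rw [fd]
        simp only [← hm, hrec, hmod]
        rw [h2, hfib2, hfib21]
        simp only [beq_self_eq_true, if_true, Prod.mk.injEq]
        constructor
        · exact hcast.symm
        · push_cast; ring
      · obtain ⟨t, ht⟩ := ho
        have hmt : m = t := by omega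
        have h2 : j + 1 = 2 * m + 1 := by omega
        have hmod : (j + 1) % 2 = 1 := by omega
        have hfib2 : Nat.fib (2 * m) = Nat.fib m * (2 * Nat.fib (m + 1) - Nat.fib m) :=
          Nat.fib_two_mul m
        have hfib21 : Nat.fib (2 * m + 1) = Nat.fib (m + 1) ^ 2 + Nat.fib m ^ 2 :=
          Nat.fib_two_mul_add_one m
        have hfib22 : Nat.fib (2 * m + 2) = Nat.fib (2 * m) + Nat.fib (2 * m + 1) :=
          Nat.fib_add_two
        rw [fd]
        simp only [← hm, hrec, hmod]
        rw [h2, hfib21, show 2 * m + 1 + 1 = 2 * m + 2 from rfl, hfib22, hfib2, hfib21]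
        norm_num
        constructor
        · ring
        · push_cast [Nat.cast_sub hle]; ring

lemma funcAux_eq : ∀ n : Nat,
    funcAux n = ((Nat.fib (2 * n + 2) : Int), (Nat.fib (2 * n + 4) : Int)) := by
  intro n
  induction n with
  | zero => simp [funcAux]; decide
  | succ j ih =>
    have e1 : Nat.fib (2 * j + 6) = Nat.fib (2 * j + 4) + Nat.fib (2 * j + 5) :=
      Nat.fib_add_two
    have e2 : Nat.fib (2 * j + 5) = Nat.fib (2 * j + 3) + Nat.fib (2 * j + 4) :=
      Nat.fib_add_two
    have e3 : Nat.fib (2 * j + 4) = Nat.fib (2 * j + 2) + Nat.fib (2 * j + 3) :=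
      Nat.fib_add_two
    rw [funcAux, ih]
    simp only [Prod.mk.injEq]
    constructor
    · rw [show 2 * (j + 1) + 2 = 2 * j + 4 from by ring]
    · rw [show 2 * (j + 1) + 4 = 2 * j + 6 from by ring]
      omega

-- ===== VERDICT (by name: the statement is the Claim_ definition above) =====
theorem func_spec : Claim_equal_func := by
  intro n _ hpre
  have hn : (0 : Int) ≤ n := hpre
  unfold Spec_func func func_alt
  have hto : (2 * n + 2).toNat = 2 * n.toNat + 2 := by omega
  rw [hto, funcAux_eq, (fd_eq (2 * n.toNat + 2))]
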